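-- pv_equiv track=rewrite | github.com/superplanehq/skills | evals/evaluators/canvas_has_workflow.py | _normalize_steps
-- ===== SOURCE A (Python) =====
-- def _normalize_steps(steps: tuple[str, ...]) -> list[str]:
--     cleaned = [s.strip() for s in steps if s.strip()]
--     normalized: list[str] = []
--     for s in cleaned:
--         if s == "..." and normalized and normalized[-1] == "...":
--             continue
--         normalized.append(s)
--     while normalized and normalized[0] == "...":
--         normalized.pop(0)
--     while normalized and normalized[-1] == "...":
--         normalized.pop()
--     return normalized
-- ===== SOURCE B (Python) =====
-- def _normalize_steps(steps):
--     out = []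
--     pending = False
--     for raw in steps:
--         s = raw.strip()
--         if not s:
--             continue
--         if s == "...":
--             if out:
--                 pending = True
--         else:
--             if pending:
--                 out.append("...")
--                 pending = False
--             out.append(s)
--     return out
-- ===== Notes on version B (the rewrite author's own statement) =====
-- stated objective: alternative
-- what changed: Single pass with a 'pending separator' boolean flag instead of A's four stages (build cleaned list, collapse loop with last-element check, leading pop-while, trailing pop-while); leading/trailing ellipses never enter the output rather than being popped afterwards.
import Mathlib
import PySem

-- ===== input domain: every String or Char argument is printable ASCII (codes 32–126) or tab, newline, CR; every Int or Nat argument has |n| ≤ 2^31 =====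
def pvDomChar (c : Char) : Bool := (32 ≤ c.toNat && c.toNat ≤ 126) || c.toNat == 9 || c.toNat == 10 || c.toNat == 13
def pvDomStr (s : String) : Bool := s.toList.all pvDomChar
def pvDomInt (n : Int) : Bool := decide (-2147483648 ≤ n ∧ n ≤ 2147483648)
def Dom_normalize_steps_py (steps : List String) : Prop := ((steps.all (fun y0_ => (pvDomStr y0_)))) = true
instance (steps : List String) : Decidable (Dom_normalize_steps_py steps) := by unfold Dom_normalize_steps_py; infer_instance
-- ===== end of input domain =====

-- B replaces A's four stages (clean, collapse with last-element check, two pop-while trims)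
-- by one pass with a pending-separator flag; same return value, different decomposition.


-- ===== PORT A =====
-- cleaned = [s.strip() for s in steps if s.strip()]
def pvAClean (steps : List String) : List String :=
  (steps.map PySem.Str.strip).filter (fun t => !(t == ""))

-- body of A's collapse loop: skip "..." when normalized is nonempty and ends in "..."
def pvAStep (nm : List String) (s : String) : List String :=
  if s = "..." ∧ nm.getLast? = some "..." then nm else nm ++ [s]

-- while normalized and normalized[0] == "...": normalized.pop(0)
def pvTrimLead : List String → List String
  | "..." :: rest => pvTrimLead rest
  | l => l

-- while normalized and normalized[-1] == "...": normalized.pop()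
def pvTrimTrail (l : List String) : List String :=
  if h : l.getLast? = some "..." then pvTrimTrail l.dropLast else l
termination_by l.length
decreasing_by
  have hne : l ≠ [] := by intro he; subst he; simp at h
  have : l.length ≠ 0 := by simpa using (List.length_pos_of_ne_nil hne).ne'
  simp [List.length_dropLast]; omega

def normalize_steps_py (steps : List String) : List String :=
  pvTrimTrail (pvTrimLead ((pvAClean steps).foldl pvAStep []))

-- ===== PORT B =====
-- single-pass state machine: (out, pending) — pending = a collapsed "..." separator is waiting
def pvBStep (st : List String × Bool) (s : String) : List String × Bool :=
  if s = "..." then (st.1, if st.1.isEmpty then st.2 else true)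
  else ((if st.2 then st.1 ++ ["..."] else st.1) ++ [s], false)

def normalize_steps_py_alt (steps : List String) : List String :=
  (steps.foldl (fun st raw =>
      let s := PySem.Str.strip raw
      if s = "" then st else pvBStep st s) (([] : List String), false)).1

-- ===== PRECONDITION & SPEC =====
def Spec_normalize_steps_py (steps : List String) (out : List String) : Prop := out = normalize_steps_py_alt steps
instance (steps : List String) (out : List String) : Decidable (Spec_normalize_steps_py steps out) := by unfold Spec_normalize_steps_py; infer_instance

-- ===== CLAIM (what is proved, stated in full; the proofs are below) =====
def Claim_equal_normalize_steps_py : Prop := ∀ (steps : List String), Dom_normalize_steps_py steps → Spec_normalize_steps_py steps (normalize_steps_py steps)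

-- ===== LEMMAS AND PROOFS =====

-- B's fold over raw steps equals the fold of pvBStep over A's cleaned list
theorem bFold_eq_clean (steps : List String) (st : List String × Bool) :
    steps.foldl (fun st raw =>
      let s := PySem.Str.strip raw
      if s = "" then st else pvBStep st s) st
    = (pvAClean steps).foldl pvBStep st := by
  induction steps generalizing st with
  | nil => simp [pvAClean]
  | cons x xs ih =>
    by_cases h : PySem.Str.strip x = "" <;>
      simp [pvAClean, List.foldl_cons, h, ih]

-- the invariant linking A's accumulator nm to B's state (out, p), with a ghost flag b
-- recording whether a single leading "..." is still present in nm
def pvInv (nm out : List String) (p b : Bool) : Prop :=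
  nm = (if b then ["..."] else []) ++ out ++ (if p then ["..."] else []) ∧
  (p = true → out ≠ []) ∧
  out.head? ≠ some "..." ∧ out.getLast? ≠ some "..."

theorem pvInv_step (nm out : List String) (p b : Bool) (s : String)
    (hs : s ≠ "") (h : pvInv nm out p b) :
    ∃ b', pvInv (pvAStep nm s) (pvBStep (out, p) s).1 (pvBStep (out, p) s).2 b' := by
  obtain ⟨hnm, hp, hhd, hlast⟩ := h
  subst hnm
  by_cases hdots : s = "..."
  · subst hdots
    cases p with
    | true =>
      have hone : out ≠ [] := hp rfl
      refine ⟨b, ?_, ?_, ?_, ?_⟩ <;>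
        simp [pvAStep, pvBStep, List.isEmpty_iff, hone, hhd, hlast]
    | false =>
      cases hout : out with
      | cons h0 t =>
        subst hout
        have hh0 : h0 ≠ "..." := by simpa using hhd
        refine ⟨b, ?_, ?_, ?_, ?_⟩ <;>
          simp [pvAStep, pvBStep, hh0, hlast]
      | nil =>
        subst hout
        cases b with
        | true =>
          refine ⟨true, ?_, ?_, ?_, ?_⟩ <;> simp [pvAStep, pvBStep]
        | false =>
          refine ⟨true, ?_, ?_, ?_, ?_⟩ <;> simp [pvAStep, pvBStep]
  · -- content token: A appends s; B flushes pending then appends s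
    refine ⟨b, ?_, ?_, ?_, ?_⟩
    · cases p <;> simp [pvAStep, pvBStep, hdots]
    · simp [pvBStep, hdots]
    · cases hout : out with
      | nil =>
        have hpf : p = false := by
          cases hpv : p with
          | true => exact absurd hout (hp hpv)
          | false => rfl
        simp [pvBStep, hdots, hpf]
      | cons h0 t =>
        have hh0 : h0 ≠ "..." := by rw [hout] at hhd; simpa using hhd
        cases p <;> simp [pvBStep, hdots, hh0]
    · cases p <;> simp [pvBStep, hdots]

theorem pvInv_fold (l : List String) (hl : ∀ s ∈ l, s ≠ "")
    (nm out : List String) (p b : Bool) (h : pvInv nm out p b) :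
    ∃ b', pvInv (l.foldl pvAStep nm) (l.foldl pvBStep (out, p)).1
      (l.foldl pvBStep (out, p)).2 b' := by
  induction l generalizing nm out p b with
  | nil => exact ⟨b, h⟩
  | cons s rest ih =>
    obtain ⟨b', h'⟩ := pvInv_step nm out p b s (hl s (by simp)) h
    have := ih (fun t ht => hl t (by simp [ht]))
      (pvAStep nm s) (pvBStep (out, p) s).1 (pvBStep (out, p) s).2 b' h'
    simpa using this

theorem pvTrimLead_no_dot (l : List String) (h : l.head? ≠ some "...") :
    pvTrimLead l = l := by
  cases l with
  | nil => rfl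
  | cons x t =>
    simp at h
    unfold pvTrimLead
    split
    · rename_i heq; injection heq with h1 h2; exact absurd h1 h
    · rfl

theorem pvTrimTrail_no_dot (l : List String) (h : l.getLast? ≠ some "...") :
    pvTrimTrail l = l := by
  unfold pvTrimTrail
  simp [h]

theorem pvInv_final (nm out : List String) (p b : Bool) (h : pvInv nm out p b) :
    pvTrimTrail (pvTrimLead nm) = out := by
  obtain ⟨hnm, hp, hhd, hlast⟩ := h
  subst hnm
  cases hout : out with
  | nil =>
    subst hout
    have hpf : p = false := by
      cases hpv : p with
      | true => exact absurd rfl (hp hpv)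
      | false => rfl
    subst hpf
    cases b <;> simp [pvTrimLead, pvTrimTrail]
  | cons h0 t =>
    subst hout
    have hh0 : h0 ≠ "..." := by simpa using hhd
    have hlead : pvTrimLead ((if b then ["..."] else []) ++ (h0 :: t) ++ (if p then ["..."] else []))
        = (h0 :: t) ++ (if p then ["..."] else []) := by
      cases b with
      | false =>
        simp only [if_neg (by simp : ¬ (false = true)), List.nil_append]
        exact pvTrimLead_no_dot _ (by simpa using hh0)
      | true =>
        show pvTrimLead ("..." :: ((h0 :: t) ++ _)) = _
        rw [show pvTrimLead ("..." :: ((h0 :: t) ++ (if p then ["..."] else []))) =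
              pvTrimLead ((h0 :: t) ++ (if p then ["..."] else [])) from rfl]
        exact pvTrimLead_no_dot _ (by simpa using hh0)
    rw [hlead]
    cases p with
    | false =>
      rw [show (if (false : Bool) then ["..."] else []) = ([] : List String) from rfl,
        List.append_nil]
      exact pvTrimTrail_no_dot _ hlast
    | true =>
      have h1 : ((h0 :: t) ++ ["..."]).getLast? = some "..." := by
        show ((h0 :: t) ++ ["..."]).getLast? = some "..."
        exact List.getLast?_concat
      rw [show (if (true : Bool) then ["..."] else []) = ["..."] from rfl]
      unfold pvTrimTrail
      rw [dif_pos h1]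
      rw [show (h0 :: t) ++ ["..."] = (h0 :: t) ++ ["..."] from rfl, List.dropLast_concat]
      exact pvTrimTrail_no_dot _ hlast

theorem pvClean_no_empty (steps : List String) : ∀ s ∈ pvAClean steps, s ≠ "" := by
  intro s hs
  simp [pvAClean] at hs
  obtain ⟨⟨x, _, hx⟩, hne⟩ := hs
  exact hne

-- ===== VERDICT (by name: the statement is the Claim_ definition above) =====
theorem normalize_steps_py_spec : Claim_equal_normalize_steps_py := by
  intro steps _
  unfold Spec_normalize_steps_py normalize_steps_py normalize_steps_py_alt
  rw [bFold_eq_clean]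
  obtain ⟨b', hinv⟩ := pvInv_fold (pvAClean steps) (pvClean_no_empty steps)
    [] [] false false ⟨rfl, by simp, by simp, by simp⟩
  exact pvInv_final _ _ _ _ hinv
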